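-- pv_equiv track=rewrite | github.com/pypi-data/pypi-mirror-392 | packages/jp-odesolver/jp_odesolver-0.0.4-py3-none-any.whl/odesolver/ode.py | runs_after_x
-- ===== SOURCE A (Python) =====
-- def runs_after_x(s):
--     results = []
--     i = 0
--
--     while i < len(s):
--         if s[i] == 'x':
--             count = 0
--             j = i + 1
--             while j < len(s) and s[j] == "'":
--                 count += 1
--                 j += 1
--             results.append(count)
--             i = j
--         else:
--             i += 1
--
--     return results
-- ===== SOURCE B (Python) =====
-- import re
--
-- def runs_after_x(s):
--     return [len(run) for run in re.findall(r"x('*)", s)]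
-- ===== Notes on version B (the rewrite author's own statement) =====
-- stated objective: idiomatic
-- what changed: Replaced the manual index-driven double while-loop with a single regex findall of x('*) whose greedy capture groups give the apostrophe run lengths directly.
import Mathlib
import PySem

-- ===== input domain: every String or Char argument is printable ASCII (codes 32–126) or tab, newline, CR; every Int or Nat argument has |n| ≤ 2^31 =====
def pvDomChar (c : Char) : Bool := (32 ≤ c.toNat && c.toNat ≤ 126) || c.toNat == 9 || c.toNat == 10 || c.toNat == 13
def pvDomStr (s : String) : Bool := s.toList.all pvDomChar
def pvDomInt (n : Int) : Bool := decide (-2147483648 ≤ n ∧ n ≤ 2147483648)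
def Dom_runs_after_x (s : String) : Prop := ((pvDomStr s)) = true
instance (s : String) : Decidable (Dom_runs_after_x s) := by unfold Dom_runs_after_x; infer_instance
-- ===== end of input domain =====

-- B replaces A's manual index scan with a regex findall of x('*); idiomatic, same cost.

-- ===== PORT A =====
-- inner while loop: count consecutive apostrophes from index j; returns the count
def runsAxInner (cs : List Char) (j : Nat) : Nat :=
  if h : j < cs.length then
    if cs[j] = '\'' then runsAxInner cs (j + 1) + 1 else 0
  else 0
termination_by cs.length - j

-- outer while loop over index i
def runsAxOuter (cs : List Char) (i : Nat) : List Int :=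
  if h : i < cs.length then
    if cs[i] = 'x' then
      let count := runsAxInner cs (i + 1)
      (count : Int) :: runsAxOuter cs (i + 1 + count)
    else runsAxOuter cs (i + 1)
  else []
termination_by cs.length - i

def runs_after_x (s : String) : List Int := runsAxOuter s.toList 0

-- ===== PORT B =====
-- regex findall of x('*): the matcher scans left to right; at each 'x' the greedy
-- '* capture takes the maximal apostrophe run and matching resumes after it
def runsBxScan (cs : List Char) : List Int :=
  match cs with
  | [] => []
  | c :: rest =>
    if c = 'x' then
      let run := rest.takeWhile (fun d => d = '\'')
      (run.length : Int) :: runsBxScan (rest.drop run.length)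
    else runsBxScan rest
termination_by cs.length
decreasing_by
  · simp only [List.length_cons, List.length_drop]; omega
  · simp

def runs_after_x_alt (s : String) : List Int := runsBxScan s.toList

-- ===== PRECONDITION & SPEC =====
def Spec_runs_after_x (s : String) (out : List Int) : Prop := out = runs_after_x_alt s
instance (s : String) (out : List Int) : Decidable (Spec_runs_after_x s out) := by unfold Spec_runs_after_x; infer_instance

-- ===== CLAIM (what is proved, stated in full; the proofs are below) =====
def Claim_equal_runs_after_x : Prop := ∀ (s : String), Dom_runs_after_x s → Spec_runs_after_x s (runs_after_x s)

-- ===== LEMMAS AND PROOFS =====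

lemma runsAxInner_eq_takeWhile (cs : List Char) (j : Nat) :
    runsAxInner cs j = ((cs.drop j).takeWhile (fun d => d = '\'')).length := by
  induction hn : cs.length - j using Nat.strong_induction_on generalizing j with
  | _ n ih =>
    rw [runsAxInner]
    by_cases h : j < cs.length
    · have hdrop : cs.drop j = cs[j] :: cs.drop (j + 1) := List.drop_eq_getElem_cons h
      rw [hdrop, List.takeWhile_cons]
      by_cases hc : cs[j] = '\''
      · simp only [h, dif_pos, hc, if_pos, decide_true, List.length_cons]
        rw [ih (cs.length - (j+1)) (by omega) (j+1) rfl]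
      · simp [h, hc]
    · simp [h, List.drop_eq_nil_of_le (Nat.le_of_not_lt h)]

lemma runsAxOuter_eq_scan (cs : List Char) (i : Nat) :
    runsAxOuter cs i = runsBxScan (cs.drop i) := by
  induction hn : cs.length - i using Nat.strong_induction_on generalizing i with
  | _ n ih =>
    rw [runsAxOuter]
    by_cases h : i < cs.length
    · have hdrop : cs.drop i = cs[i] :: cs.drop (i + 1) := List.drop_eq_getElem_cons h
      rw [hdrop, runsBxScan]
      by_cases hc : cs[i] = 'x'
      · simp only [h, dif_pos, hc, if_pos]
        have hcnt := runsAxInner_eq_takeWhile cs (i + 1)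
        refine congrArg₂ _ (by rw [hcnt]) ?_
        rw [ih (cs.length - (i + 1 + runsAxInner cs (i+1))) (by omega) _ rfl]
        rw [List.drop_drop, hcnt]

      · simp only [h, dif_pos, hc, if_false]
        exact ih (cs.length - (i+1)) (by omega) (i+1) rfl
    · simp [h, List.drop_eq_nil_of_le (Nat.le_of_not_lt h), runsBxScan]

-- ===== VERDICT (by name: the statement is the Claim_ definition above) =====
theorem runs_after_x_spec : Claim_equal_runs_after_x := by
  intro s _
  unfold Spec_runs_after_x runs_after_x runs_after_x_alt
  simpa using runsAxOuter_eq_scan s.toList 0
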